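-- pv_equiv track=rewrite | github.com/Madan2248c/Lepa-Fello | lepa-backend/clients/apollo_client.py | _get_employee_range
-- ===== SOURCE A (Python) =====
-- from typing import Optional
--
-- def _get_employee_range(count: Optional[int]) -> Optional[str]:
--     """Convert employee count to standardized range."""
--     if not count:
--         return None
--
--     ranges = [
--         (10, "1-10"),
--         (50, "11-50"),
--         (200, "51-200"),
--         (500, "201-500"),
--         (1000, "501-1000"),
--         (5000, "1001-5000"),
--         (10000, "5001-10000"),
--     ]
--
--     for threshold, label in ranges:
--         if count < threshold:
--             return label
--
--     return "10000+"
-- ===== SOURCE B (Python) =====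
-- import bisect
-- from typing import Optional
--
-- _THRESHOLDS = [10, 50, 200, 500, 1000, 5000, 10000]
-- _LABELS = ["1-10", "11-50", "51-200", "201-500", "501-1000",
--            "1001-5000", "5001-10000", "10000+"]
--
-- def _get_employee_range(count: Optional[int]) -> Optional[str]:
--     if not count:
--         return None
--     return _LABELS[bisect.bisect_right(_THRESHOLDS, count)]
-- ===== Notes on version B (the rewrite author's own statement) =====
-- stated objective: idiomatic
-- what changed: Replaces the sequential scan over (threshold,label) pairs with an indexed binary search: labels[bisect.bisect_right(thresholds, count)] over a sorted threshold list.
import Mathlib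
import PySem

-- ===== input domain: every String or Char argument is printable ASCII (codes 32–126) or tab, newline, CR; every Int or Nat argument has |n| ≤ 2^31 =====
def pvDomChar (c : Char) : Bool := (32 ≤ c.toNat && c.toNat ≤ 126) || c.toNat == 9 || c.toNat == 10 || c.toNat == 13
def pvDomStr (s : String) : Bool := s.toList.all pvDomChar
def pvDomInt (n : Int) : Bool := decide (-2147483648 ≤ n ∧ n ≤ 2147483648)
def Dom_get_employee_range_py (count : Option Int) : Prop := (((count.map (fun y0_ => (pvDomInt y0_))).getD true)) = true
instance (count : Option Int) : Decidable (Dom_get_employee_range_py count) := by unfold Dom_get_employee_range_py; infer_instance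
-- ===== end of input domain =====

-- B replaces A's linear scan over (threshold,label) pairs with labels[bisect_right(thresholds, count)] — a binary search; return values identical on all inputs.
-- ===== PORT A =====
-- A: guard `if not count`, then linear scan over (threshold,label) pairs with `count < threshold`.
def pyRangesA : List (Int × String) :=
  [(10, "1-10"), (50, "11-50"), (200, "51-200"), (500, "201-500"),
   (1000, "501-1000"), (5000, "1001-5000"), (10000, "5001-10000")]

def scanRangesA (count : Int) : List (Int × String) → Option String
  | [] => some "10000+"
  | (threshold, label) :: rest =>
      if count < threshold then some label else scanRangesA count rest

def get_employee_range_py (count : Option Int) : Option String :=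
  match count with
  | none => none
  | some c => if c = 0 then none else scanRangesA c pyRangesA

-- ===== PORT B =====
-- B: guard kept, then labels[bisect_right(thresholds, count)] (binary search, PySem.List.bisectRight).
def pyThresholdsB : List Int := [10, 50, 200, 500, 1000, 5000, 10000]
def pyLabelsB : List String :=
  ["1-10", "11-50", "51-200", "201-500", "501-1000", "1001-5000", "5001-10000", "10000+"]

def get_employee_range_py_alt (count : Option Int) : Option String :=
  match count with
  | none => none
  | some c => if c = 0 then none else
      PySem.List.pyGet? pyLabelsB (PySem.List.bisectRight pyThresholdsB c : Nat)

-- ===== PRECONDITION & SPEC =====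
def Spec_get_employee_range_py (count : Option Int) (out : Option String) : Prop := out = get_employee_range_py_alt count
instance (count : Option Int) (out : Option String) : Decidable (Spec_get_employee_range_py count out) := by unfold Spec_get_employee_range_py; infer_instance

-- ===== CLAIM (what is proved, stated in full; the proofs are below) =====
def Claim_equal_get_employee_range_py : Prop := ∀ (count : Option Int), Dom_get_employee_range_py count → Spec_get_employee_range_py count (get_employee_range_py count)

-- ===== LEMMAS AND PROOFS =====

-- ===== VERDICT (by name: the statement is the Claim_ definition above) =====
theorem get_employee_range_py_spec : Claim_equal_get_employee_range_py := by
  intro count _hdom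
  unfold Spec_get_employee_range_py
  match count with
  | none => rfl
  | some c =>
      by_cases h0 : c = 0
      · simp [get_employee_range_py, get_employee_range_py_alt, h0]
      · simp only [get_employee_range_py, get_employee_range_py_alt, if_neg h0,
          pyRangesA, pyThresholdsB, pyLabelsB, scanRangesA,
          PySem.List.bisectRight, List.length_cons, List.length_nil]
        norm_num [PySem.List.bisectRightLoop]
        split_ifs <;> first | omega | simp [PySem.List.pyGet?, PySem.List.pyIdx?]
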